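-- pv_equiv track=rewrite | github.com/joshuacortez/wordnt | agents/SuperAgent/best_proposal_finder.py | get_basis_words_per_proposal_slow
-- ===== SOURCE A (Python) =====
-- import copy
--
-- def get_basis_words_per_proposal_slow(proposal_strings, halt_words, basis_words):
--     basis_words_per_proposal = {}
--
--     for proposal in proposal_strings:
--         basis_words_per_proposal[proposal] = set()
--         for word in basis_words:
--             if proposal in word:
--                 basis_words_per_proposal[proposal].add(word)
--
--     basis_words_nonhalt_per_proposal = copy.deepcopy(basis_words_per_proposal)
--
--     if halt_words:
--         for proposal, basis_words_filtered in basis_words_per_proposal.items():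
--             halt_basis_words = set()
--
--             for basis_word in basis_words_filtered:
--                 for halt_word in halt_words:
--                     if halt_word in basis_word:
--                         halt_basis_words.add(basis_word)
--                         break
--             basis_words_nonhalt_per_proposal[proposal] -= halt_basis_words
--
--     return basis_words_per_proposal, basis_words_nonhalt_per_proposal
-- ===== SOURCE B (Python) =====
-- def get_basis_words_per_proposal_slow(proposal_strings, halt_words, basis_words):
--     # Precompute the halt-containing basis words ONCE over all basis words,
--     # instead of re-scanning halt_words per proposal per basis word.
--     if halt_words:
--         halt_set = {w for w in basis_words if any(h in w for h in halt_words)}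
--     else:
--         halt_set = set()
--     basis_words_per_proposal = {}
--     basis_words_nonhalt_per_proposal = {}
--     for proposal in proposal_strings:
--         matched = [w for w in basis_words if proposal in w]
--         basis_words_per_proposal[proposal] = set(matched)
--         basis_words_nonhalt_per_proposal[proposal] = {w for w in matched if w not in halt_set}
--     return basis_words_per_proposal, basis_words_nonhalt_per_proposal
-- ===== Notes on version B (the rewrite author's own statement) =====
-- stated objective: faster
-- what changed: B computes the set of halt-containing basis words once over all basis_words and builds both dicts in a single pass over proposals, instead of re-running the halt-word scan for every proposal's matched set after a deepcopy.
import Mathlib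
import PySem

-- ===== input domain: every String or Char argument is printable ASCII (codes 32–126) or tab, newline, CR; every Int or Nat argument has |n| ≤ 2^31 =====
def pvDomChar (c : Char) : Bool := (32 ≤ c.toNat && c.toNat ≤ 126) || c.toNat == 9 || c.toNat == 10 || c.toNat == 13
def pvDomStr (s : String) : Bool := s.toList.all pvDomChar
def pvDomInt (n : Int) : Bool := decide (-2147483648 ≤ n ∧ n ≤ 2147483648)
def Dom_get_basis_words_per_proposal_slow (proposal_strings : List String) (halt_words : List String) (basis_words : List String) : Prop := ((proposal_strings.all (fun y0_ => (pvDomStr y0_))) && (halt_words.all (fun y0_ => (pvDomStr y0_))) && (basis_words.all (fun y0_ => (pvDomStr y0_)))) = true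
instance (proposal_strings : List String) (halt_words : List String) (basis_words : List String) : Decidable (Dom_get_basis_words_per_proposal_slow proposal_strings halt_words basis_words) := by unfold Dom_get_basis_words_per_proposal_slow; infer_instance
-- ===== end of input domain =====

-- B precomputes the halt-containing basis words once over all basis_words and builds both
-- dicts in one pass over the proposals (asymptotically fewer halt-word scans); return values
-- are proved identical. Dict values are Python sets (compared as finite sets by convention).

-- ===== PORT A =====
-- 'for halt_word in halt_words: if halt_word in basis_word: …; break' — first hit stops the scan
def pvHaltHit (halt_words : List String) (basis_word : String) : Bool :=
  match halt_words with
  | [] => false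
  | h :: rest => if PySem.Str.isIn h basis_word then true else pvHaltHit rest basis_word

def get_basis_words_per_proposal_slow (proposal_strings : List String) (halt_words : List String) (basis_words : List String) : (List (String × List String)) × (List (String × List String)) :=
  -- first loop: basis_words_per_proposal[proposal] = {word for word … if proposal in word}
  let d1 : PySem.Dict String (PySem.Set String) :=
    proposal_strings.foldl (fun d proposal =>
      d.insert proposal (basis_words.foldl
        (fun s word => if PySem.Str.isIn proposal word then PySem.Set.add s word else s)
        PySem.Set.empty)) PySem.Dict.empty
  -- deepcopy, then (if halt_words) subtract the halt-containing words per proposal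
  let d2 : PySem.Dict String (PySem.Set String) :=
    if halt_words.isEmpty then d1
    else
      d1.items.foldl (fun d pv =>
        d.modify pv.1 PySem.Set.empty (fun s => PySem.Set.diff s
          (pv.2.foldl (fun h w => if pvHaltHit halt_words w then PySem.Set.add h w else h)
            PySem.Set.empty))) d1
  (d1.items, d2.items)

-- ===== PORT B =====
def get_basis_words_per_proposal_slow_alt (proposal_strings : List String) (halt_words : List String) (basis_words : List String) : (List (String × List String)) × (List (String × List String)) :=
  let halt_set : PySem.Set String :=
    if halt_words.isEmpty then PySem.Set.empty
    else PySem.Set.ofList (basis_words.filter (fun w => halt_words.any (fun h => PySem.Str.isIn h w)))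
  let dd : PySem.Dict String (PySem.Set String) × PySem.Dict String (PySem.Set String) :=
    proposal_strings.foldl (fun acc proposal =>
      let matched := basis_words.filter (fun w => PySem.Str.isIn proposal w)
      (acc.1.insert proposal (PySem.Set.ofList matched),
       acc.2.insert proposal (PySem.Set.ofList
         (matched.filter (fun w => !(PySem.Set.contains halt_set w))))))
      (PySem.Dict.empty, PySem.Dict.empty)
  (dd.1.items, dd.2.items)

-- ===== PRECONDITION & SPEC =====
def Spec_get_basis_words_per_proposal_slow (proposal_strings : List String) (halt_words : List String) (basis_words : List String) (out : (List (String × List String)) × (List (String × List String))) : Prop := out = get_basis_words_per_proposal_slow_alt proposal_strings halt_words basis_words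
instance (proposal_strings : List String) (halt_words : List String) (basis_words : List String) (out : (List (String × List String)) × (List (String × List String))) : Decidable (Spec_get_basis_words_per_proposal_slow proposal_strings halt_words basis_words out) := by unfold Spec_get_basis_words_per_proposal_slow; infer_instance

-- ===== CLAIM (what is proved, stated in full; the proofs are below) =====
def Claim_equal_get_basis_words_per_proposal_slow : Prop := ∀ (proposal_strings : List String) (halt_words : List String) (basis_words : List String), Dom_get_basis_words_per_proposal_slow proposal_strings halt_words basis_words → Spec_get_basis_words_per_proposal_slow proposal_strings halt_words basis_words (get_basis_words_per_proposal_slow proposal_strings halt_words basis_words)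

-- ===== LEMMAS AND PROOFS =====

theorem pv_filter_add (q : String → Bool) (s : PySem.Set String) (x : String) :
    (PySem.Set.add s x).filter q
      = if q x then PySem.Set.add (s.filter q) x else s.filter q := by
  by_cases hq : q x = true <;> by_cases hc : x ∈ s <;>
    simp [PySem.Set.add, PySem.Set.contains, hq, hc, List.filter_append, List.mem_filter]

theorem pv_foldl_add_filter (q : String → Bool) (xs : List String) : ∀ (s : PySem.Set String),
    (xs.foldl PySem.Set.add s).filter q = (xs.filter q).foldl PySem.Set.add (s.filter q) := by
  induction xs with
  | nil => intro s; rfl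
  | cons x xs ih =>
    intro s
    by_cases hq : q x = true <;>
      simp [List.filter_cons, hq, ih, pv_filter_add]

theorem pv_ofList_filter (q : String → Bool) (xs : List String) :
    PySem.Set.ofList (xs.filter q) = (PySem.Set.ofList xs).filter q := by
  simpa [PySem.Set.ofList, PySem.Set.empty] using (pv_foldl_add_filter q xs []).symm

theorem pv_update_self (l : List String) : ∀ (s : PySem.Set String),
    (∀ x ∈ l, x ∈ s) → PySem.Set.update s l = s := by
  induction l with
  | nil => intro s _; rfl
  | cons x l ih =>
    intro s h
    have hx : x ∈ s := h x (by simp)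
    have : PySem.Set.add s x = s := by simp [PySem.Set.add, PySem.Set.contains, hx]
    simp only [PySem.Set.update, List.foldl_cons, this]
    exact ih s (fun y hy => h y (by simp [hy]))

theorem pv_getD_foldl_modify_not_mem
    (f : (String × PySem.Set String) → PySem.Set String → PySem.Set String)
    (l : List (String × PySem.Set String)) : ∀ (d : PySem.Dict String (PySem.Set String))
    (k : String), k ∉ l.map Prod.fst →
    (l.foldl (fun d pv => d.modify pv.1 PySem.Set.empty (fun s => f pv s)) d).getD k PySem.Set.empty
      = d.getD k PySem.Set.empty := by
  induction l with
  | nil => intro d k _; rfl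
  | cons pv l ih =>
    intro d k hk
    simp only [List.map_cons, List.mem_cons, not_or] at hk
    simp only [List.foldl_cons]
    rw [ih _ k hk.2, PySem.Dict.getD_modify_of_ne _ _ _ hk.1]

theorem pv_getD_foldl_modify_mem
    (f : (String × PySem.Set String) → PySem.Set String → PySem.Set String)
    (l : List (String × PySem.Set String)) : ∀ (d : PySem.Dict String (PySem.Set String))
    (k : String) (v : PySem.Set String), (l.map Prod.fst).Nodup → (k, v) ∈ l →
    (l.foldl (fun d pv => d.modify pv.1 PySem.Set.empty (fun s => f pv s)) d).getD k PySem.Set.empty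
      = f (k, v) (d.getD k PySem.Set.empty) := by
  induction l with
  | nil => intro d k v _ hm; simp at hm
  | cons pv l ih =>
    intro d k v hnd hm
    simp only [List.map_cons, List.nodup_cons] at hnd
    rcases List.mem_cons.mp hm with h | h
    · subst h
      simp only [List.foldl_cons]
      have hk : k ∉ l.map Prod.fst := by simpa using hnd.1
      rw [pv_getD_foldl_modify_not_mem f l _ k hk, PySem.Dict.getD_modify_self]
    · have hne : k ≠ pv.1 := by
        intro he
        exact hnd.1 (he ▸ (List.mem_map.mpr ⟨(k, v), h, rfl⟩))
      simp only [List.foldl_cons]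
      rw [ih _ k v hnd.2 h, PySem.Dict.getD_modify_of_ne _ _ _ hne]

theorem pv_items_foldl_insert_fn (f : String → PySem.Set String) :
    ∀ (ps : List String) (d : PySem.Dict String (PySem.Set String)),
      d.keys.Nodup → d.items = d.keys.map (fun k => (k, f k)) →
      (ps.foldl (fun d p => d.insert p (f p)) d).items
        = (PySem.Set.update d.keys ps).map (fun k => (k, f k)) := by
  intro ps
  induction ps with
  | nil => intro d _ hit; simpa [PySem.Set.update] using hit
  | cons p ps ih =>
    intro d hnd hit
    simp only [List.foldl_cons, PySem.Set.update, PySem.Set.add]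
    by_cases hc : d.contains p = true
    · have hkeys : (d.insert p (f p)).keys = d.keys := PySem.Dict.keys_insert_of_contains d (f p) hc
      have hmem : p ∈ d.keys := (PySem.Dict.contains_iff_mem_keys d p).mp hc
      have hitems : (d.insert p (f p)).items = d.keys.map (fun k => (k, f k)) := by
        rw [PySem.Dict.items_insert_of_contains d (f p) hc, hit, List.map_map]
        refine List.map_congr_left ?_
        intro k _
        by_cases hk : k = p <;> simp [hk]
      have := ih (d.insert p (f p)) (hkeys ▸ hnd) (by rw [hitems, hkeys])
      simpa [PySem.Set.update, PySem.Set.contains, hmem, hkeys] using this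
    · have hc' : d.contains p = false := by simpa using hc
      have hkeys : (d.insert p (f p)).keys = d.keys ++ [p] :=
        PySem.Dict.keys_insert_of_not_contains d (f p) hc'
      have hmem : p ∉ d.keys := fun h => hc ((PySem.Dict.contains_iff_mem_keys d p).mpr h)
      have hnd' : (d.insert p (f p)).keys.Nodup := PySem.Dict.nodup_keys_insert d p (f p) hnd
      have hitems : (d.insert p (f p)).items = (d.keys ++ [p]).map (fun k => (k, f k)) := by
        rw [PySem.Dict.items_insert_of_not_contains d (f p) hc', hit]; simp
      have := ih (d.insert p (f p)) hnd' (by rw [hitems, hkeys])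
      simpa [PySem.Set.update, PySem.Set.contains, hmem, hkeys] using this

-- value agreement per key: A's per-proposal subtraction equals B's filter by the precomputed set
theorem pv_val_eq (hs bs : List String) (p : String) :
    PySem.Set.diff (PySem.Set.ofList (bs.filter (fun w => PySem.Str.isIn p w)))
      (PySem.Set.ofList ((PySem.Set.ofList (bs.filter (fun w => PySem.Str.isIn p w))).filter
        (fun w => hs.any (fun h => PySem.Str.isIn h w))))
    = PySem.Set.ofList ((bs.filter (fun w => PySem.Str.isIn p w)).filter
        (fun w => !(PySem.Set.contains
          (PySem.Set.ofList (bs.filter (fun w => hs.any (fun h => PySem.Str.isIn h w)))) w))) := by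
  set any := fun w => hs.any (fun h => PySem.Str.isIn h w) with hany
  set matched := bs.filter (fun w => PySem.Str.isIn p w) with hmat
  have hrhs : (matched.filter (fun w => !(PySem.Set.contains (PySem.Set.ofList (bs.filter any)) w)))
      = matched.filter (fun w => ! any w) := by
    refine List.filter_congr ?_
    intro w hw
    have hwbs : w ∈ bs := (List.mem_filter.mp (hmat ▸ hw)).1
    have : PySem.Set.contains (PySem.Set.ofList (bs.filter any)) w = any w := by
      rcases Bool.eq_false_or_eq_true (any w) with ha | ha <;>
        simp [PySem.Set.contains, PySem.Set.mem_ofList, List.mem_filter, hwbs, ha]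
    rw [this]
  have hlhs : PySem.Set.diff (PySem.Set.ofList matched)
      (PySem.Set.ofList ((PySem.Set.ofList matched).filter any))
      = (PySem.Set.ofList matched).filter (fun w => ! any w) := by
    unfold PySem.Set.diff
    refine List.filter_congr ?_
    intro x hx
    have : PySem.Set.contains (PySem.Set.ofList ((PySem.Set.ofList matched).filter any)) x
        = any x := by
      rcases Bool.eq_false_or_eq_true (any x) with ha | ha <;>
        simp [PySem.Set.contains, PySem.Set.mem_ofList, List.mem_filter, hx, ha]
    rw [this]
  rw [hlhs, hrhs]; exact (pv_ofList_filter _ matched).symm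


theorem pv_filter_foldl_add (c : String → Bool) (xs : List String) (s : PySem.Set String) :
    xs.foldl (fun s w => if c w then PySem.Set.add s w else s) s
      = (xs.filter c).foldl PySem.Set.add s := by
  induction xs generalizing s with
  | nil => rfl
  | cons x xs ih =>
    by_cases h : c x = true <;> simp [h, ih]

theorem pv_haltHit_eq (hs : List String) (w : String) :
    pvHaltHit hs w = hs.any (fun h => PySem.Str.isIn h w) := by
  induction hs with
  | nil => rfl
  | cons h rest ih =>
    simp [pvHaltHit, ih]

theorem pv_foldl_add_eq_ofList (xs : List String) :
    xs.foldl PySem.Set.add PySem.Set.empty = PySem.Set.ofList xs := rfl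

-- ===== VERDICT (by name: the statement is the Claim_ definition above) =====
theorem get_basis_words_per_proposal_slow_spec : Claim_equal_get_basis_words_per_proposal_slow := by
  intro ps hs bs _
  unfold Spec_get_basis_words_per_proposal_slow
  unfold get_basis_words_per_proposal_slow get_basis_words_per_proposal_slow_alt
  simp only [pv_haltHit_eq, pv_filter_foldl_add, pv_foldl_add_eq_ofList]
  by_cases hemp : hs.isEmpty = true
  · rw [if_pos hemp, if_pos hemp]
    have hcont : ∀ w : String, PySem.Set.contains (PySem.Set.empty : PySem.Set String) w = false :=
      fun _ => rfl
    simp only [hcont, Bool.not_false, List.filter_true]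
    rw [PySem.List.foldl_prod_mk
      (f := fun (d : PySem.Dict String (PySem.Set String)) p =>
        d.insert p (PySem.Set.ofList (bs.filter (fun w => PySem.Str.isIn p w))))
      (g := fun (d : PySem.Dict String (PySem.Set String)) p =>
        d.insert p (PySem.Set.ofList (bs.filter (fun w => PySem.Str.isIn p w))))]
  · rw [if_neg hemp, if_neg hemp]
    rw [PySem.List.foldl_prod_mk
      (f := fun (d : PySem.Dict String (PySem.Set String)) p =>
        d.insert p (PySem.Set.ofList (bs.filter (fun w => PySem.Str.isIn p w))))
      (g := fun (d : PySem.Dict String (PySem.Set String)) p =>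
        d.insert p (PySem.Set.ofList ((bs.filter (fun w => PySem.Str.isIn p w)).filter
          (fun w => !(PySem.Set.contains (PySem.Set.ofList (bs.filter (fun w => hs.any (fun h => PySem.Str.isIn h w)))) w)))))]
    simp only [Prod.mk.injEq]
    refine ⟨trivial, ?_⟩
    have hnodS : (PySem.Set.ofList ps).Nodup := PySem.Set.nodup_ofList ps
    have hd1 : (ps.foldl (fun d p =>
          d.insert p (PySem.Set.ofList (bs.filter (fun w => PySem.Str.isIn p w)))) PySem.Dict.empty).items
        = (PySem.Set.ofList ps).map (fun k => (k, PySem.Set.ofList (bs.filter (fun w => PySem.Str.isIn k w)))) :=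
      pv_items_foldl_insert_fn _ ps PySem.Dict.empty PySem.Dict.nodup_keys_empty rfl
    set F := ps.foldl (fun d p =>
      d.insert p (PySem.Set.ofList (bs.filter (fun w => PySem.Str.isIn p w)))) PySem.Dict.empty with hF
    have hkeysF : F.keys = PySem.Set.ofList ps := by
      rw [show F.keys = F.items.map Prod.fst from rfl, hd1, List.map_map]
      exact List.map_id _
    have hnodF : F.keys.Nodup := hkeysF ▸ hnodS
    have hmapfst : F.items.map Prod.fst = F.keys := rfl
    set G := F.items.foldl (fun d pv =>
      d.modify pv.1 PySem.Set.empty (fun s => PySem.Set.diff s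
        (PySem.Set.ofList (pv.2.filter (fun w => hs.any (fun h => PySem.Str.isIn h w)))))) F with hG
    have hkeysG : G.keys = PySem.Set.ofList ps := by
      rw [hG, PySem.Dict.keys_foldl_modify_key F.items Prod.fst PySem.Set.empty
        (fun _ pv => fun s => PySem.Set.diff s
          (PySem.Set.ofList (pv.2.filter (fun w => hs.any (fun h => PySem.Str.isIn h w))))),
        hmapfst, hkeysF]
      exact pv_update_self _ _ (fun x hx => hx)
    have hnodG : G.keys.Nodup := hkeysG ▸ hnodS
    have hgetD : ∀ k ∈ PySem.Set.ofList ps, G.getD k PySem.Set.empty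
        = PySem.Set.ofList ((bs.filter (fun w => PySem.Str.isIn k w)).filter
            (fun w => !(PySem.Set.contains (PySem.Set.ofList (bs.filter
              (fun w => hs.any (fun h => PySem.Str.isIn h w)))) w))) := by
      intro k hk
      have hm : (k, PySem.Set.ofList (bs.filter (fun w => PySem.Str.isIn k w))) ∈ F.items := by
        rw [hd1]; exact List.mem_map.mpr ⟨k, hk, rfl⟩
      have hnd : (F.items.map Prod.fst).Nodup := by rw [hmapfst]; exact hnodF
      rw [hG, pv_getD_foldl_modify_mem
        (fun pv s => PySem.Set.diff s
          (PySem.Set.ofList (pv.2.filter (fun w => hs.any (fun h => PySem.Str.isIn h w)))))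
        F.items F k _ hnd hm,
        PySem.Dict.getD_of_mem_items F hm hnodF]
      exact pv_val_eq hs bs k
    have hitemsG : G.items = (PySem.Set.ofList ps).map (fun k => (k, G.getD k PySem.Set.empty)) := by
      rw [PySem.Dict.items_eq_map_keys G hnodG PySem.Set.empty, hkeysG]
    have hd2B : (ps.foldl (fun d p =>
          d.insert p (PySem.Set.ofList ((bs.filter (fun w => PySem.Str.isIn p w)).filter
            (fun w => !(PySem.Set.contains (PySem.Set.ofList (bs.filter
              (fun w => hs.any (fun h => PySem.Str.isIn h w)))) w))))) PySem.Dict.empty).items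
        = (PySem.Set.ofList ps).map (fun k => (k, PySem.Set.ofList ((bs.filter (fun w => PySem.Str.isIn k w)).filter
            (fun w => !(PySem.Set.contains (PySem.Set.ofList (bs.filter
              (fun w => hs.any (fun h => PySem.Str.isIn h w)))) w))))) :=
      pv_items_foldl_insert_fn _ ps PySem.Dict.empty PySem.Dict.nodup_keys_empty rfl
    rw [hitemsG, hd2B]
    exact List.map_congr_left (fun k hk => by rw [hgetD k hk])
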